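-- pv_equiv track=rewrite | github.com/cziwen/TockFormer | Utility/RecipeParser.py | _find_top_level
-- ===== SOURCE A (Python) =====
-- def _find_top_level (expr: str, token: str) -> int:
--     depth = 0
--     L = len (token)
--     for i, ch in enumerate (expr):
--         if ch == '(':
--             depth += 1
--         elif ch == ')':
--             depth -= 1
--         if depth == 0 and expr[i:i + L] == token:
--             return i
--     return -1
-- ===== SOURCE B (Python) =====
-- def _find_top_level(expr: str, token: str) -> int:
--     # One pass builds the prefix paren-balance D (depth after consuming expr[i]),
--     # then jump between occurrences of token with str.find instead of testing every index.
--     n = len(expr)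
--     D = []
--     d = 0
--     for ch in expr:
--         if ch == '(':
--             d += 1
--         elif ch == ')':
--             d -= 1
--         D.append(d)
--     start = 0
--     while True:
--         p = expr.find(token, start)
--         if p == -1 or p >= n:
--             return -1
--         if D[p] == 0:
--             return p
--         start = p + 1
-- ===== Notes on version B (the rewrite author's own statement) =====
-- stated objective: faster
-- what changed: A fuses depth tracking with a fresh slice comparison at every index; B builds a prefix paren-balance array in one pass and then jumps directly between occurrences of token via str.find, testing only those candidates.
import Mathlib
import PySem

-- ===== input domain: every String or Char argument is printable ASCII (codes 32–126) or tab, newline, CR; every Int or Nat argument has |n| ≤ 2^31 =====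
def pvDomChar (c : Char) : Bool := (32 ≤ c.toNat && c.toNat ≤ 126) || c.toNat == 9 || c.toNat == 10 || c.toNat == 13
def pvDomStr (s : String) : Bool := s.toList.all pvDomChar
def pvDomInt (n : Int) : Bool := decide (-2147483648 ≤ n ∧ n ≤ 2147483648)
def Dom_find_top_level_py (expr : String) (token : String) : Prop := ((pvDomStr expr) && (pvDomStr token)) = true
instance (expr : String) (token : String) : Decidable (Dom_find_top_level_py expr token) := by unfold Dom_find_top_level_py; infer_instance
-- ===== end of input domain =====

-- B replaces A's fused per-character scan-and-compare with a prefix-balance array plus str.find-driven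
-- candidate jumps: only actual occurrences of token are tested (measured faster in a timing run).


-- ===== PORT A =====
-- A's enumerate loop: update depth from the current char, then test depth == 0 and expr[i:i+L] == token.
def pyA_loop (full tok : List Char) (L : Nat) : List Char → Nat → Int → Int
  | [], _, _ => -1
  | ch :: rest, i, depth =>
    let depth' := if ch = '(' then depth + 1 else if ch = ')' then depth - 1 else depth
    if depth' = 0 ∧ PySem.List.slice full (some (i : Int)) (some ((i : Int) + (L : Int))) = tok then (i : Int)
    else pyA_loop full tok L rest (i + 1) depth'

def find_top_level_py (expr : String) (token : String) : Int :=
  pyA_loop expr.toList token.toList token.toList.length expr.toList 0 0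

-- ===== PORT B =====
-- B's first pass: D[i] = paren balance after consuming expr[0..i].
def pyB_buildD : List Char → Int → List Int
  | [], _ => []
  | ch :: rest, d =>
    let d' := if ch = '(' then d + 1 else if ch = ')' then d - 1 else d
    d' :: pyB_buildD rest d'

-- B's 'while True' loop over expr.find(token, start); fuel n + 1 bounds the iterations
-- (start strictly increases and stays ≤ n), so the 0-fuel branch is never reached.
def pyB_loop (full tok : List Char) (D : List Int) (n : Nat) : Nat → Nat → Int
  | 0, _ => -1
  | fuel + 1, start =>
    let p := PySem.Chars.findFrom full tok (start : Int) none
    if p = -1 ∨ (n : Int) ≤ p then -1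
    else if PySem.List.pyGetD D p 0 = 0 then p   -- D[p]: 0 ≤ p < n = |D| here, so the default is never used
    else pyB_loop full tok D n fuel (p.toNat + 1)

def find_top_level_py_alt (expr : String) (token : String) : Int :=
  let full := expr.toList
  let n := full.length
  pyB_loop full token.toList (pyB_buildD full 0) n (n + 1) 0

-- ===== PRECONDITION & SPEC =====
def Spec_find_top_level_py (expr : String) (token : String) (out : Int) : Prop := out = find_top_level_py_alt expr token
instance (expr : String) (token : String) (out : Int) : Decidable (Spec_find_top_level_py expr token out) := by unfold Spec_find_top_level_py; infer_instance

-- ===== CLAIM (what is proved, stated in full; the proofs are below) =====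
def Claim_equal_find_top_level_py : Prop := ∀ (expr : String) (token : String), Dom_find_top_level_py expr token → Spec_find_top_level_py expr token (find_top_level_py expr token)

-- ===== LEMMAS AND PROOFS =====

-- step of the paren balance, and the balance of a prefix
def pvStep (d : Int) (ch : Char) : Int := if ch = '(' then d + 1 else if ch = ')' then d - 1 else d
def pvBal (l : List Char) : Int := l.foldl pvStep 0
-- index j is 'good' iff the balance through expr[j] is 0 and token occurs at j
def pvGood (full tok : List Char) (j : Nat) : Bool :=
  decide (pvBal (full.take (j + 1)) = 0) && decide (tok <+: full.drop j)
-- reference value: first good index ≥ start, else -1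
def pvRef (full tok : List Char) (start : Nat) : Int :=
  match (List.range' start (full.length - start)).find? (pvGood full tok) with
  | some j => (j : Int)
  | none => -1

lemma bal_take_succ (full : List Char) (i : Nat) (ch : Char) (rest : List Char)
    (h : full.drop i = ch :: rest) : pvBal (full.take (i + 1)) = pvStep (pvBal (full.take i)) ch := by
  have hch : full[i]? = some ch := by
    have h2 : (full.drop i)[0]? = full[i + 0]? := List.getElem?_drop
    simp [h] at h2
    simp [← h2]
  rw [List.take_add_one, hch]
  simp [pvBal, List.foldl_append]

lemma slice_eq_iff (full tok : List Char) (i : Nat) :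
    PySem.List.slice full (some (i : Int)) (some ((i : Int) + (tok.length : Int))) = tok ↔ tok <+: full.drop i := by
  rw [PySem.List.slice_natCast_add, List.prefix_iff_eq_take, eq_comm]

lemma A_correct (full tok : List Char) :
    ∀ l i, l = full.drop i → pyA_loop full tok tok.length l i (pvBal (full.take i)) = pvRef full tok i := by
  intro l
  induction l with
  | nil =>
    intro i h
    have hlen : full.length ≤ i := List.drop_eq_nil_iff.mp h.symm
    simp [pyA_loop, pvRef, Nat.sub_eq_zero_of_le hlen]
  | cons ch rest ih =>
    intro i h
    have hlt : i < full.length := by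
      by_contra hcon
      rw [List.drop_eq_nil_iff.mpr (by omega)] at h
      simp at h
    have hbal : pvBal (full.take (i + 1)) = pvStep (pvBal (full.take i)) ch :=
      bal_take_succ full i ch rest h.symm
    have hrest : rest = full.drop (i + 1) := by
      have : full.drop (i + 1) = (full.drop i).drop 1 := by rw [List.drop_drop]
      rw [this, ← h]
      rfl
    have hrange : full.length - i = (full.length - (i + 1)) + 1 := by omega
    simp only [pyA_loop]
    rw [show (if ch = '(' then pvBal (full.take i) + 1
          else if ch = ')' then pvBal (full.take i) - 1 else pvBal (full.take i))
        = pvBal (full.take (i + 1)) by rw [hbal]; rfl]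
    by_cases hg : pvGood full tok i = true
    · have hcond : pvBal (full.take (i + 1)) = 0 ∧
          PySem.List.slice full (some (i : Int)) (some ((i : Int) + (tok.length : Int))) = tok := by
        have := hg
        unfold pvGood at this
        simp at this
        exact ⟨this.1, (slice_eq_iff full tok i).mpr this.2⟩
      rw [if_pos hcond]
      unfold pvRef
      rw [hrange, List.range'_succ, List.find?_cons_of_pos hg]
    · have hcond : ¬ (pvBal (full.take (i + 1)) = 0 ∧
          PySem.List.slice full (some (i : Int)) (some ((i : Int) + (tok.length : Int))) = tok) := by
        intro hc
        apply hg
        unfold pvGood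
        simp
        exact ⟨hc.1, (slice_eq_iff full tok i).mp hc.2⟩
      rw [if_neg hcond]
      rw [ih (i + 1) hrest]
      unfold pvRef
      rw [hrange, List.range'_succ, List.find?_cons_of_neg (by simpa using hg)]

lemma buildD_getD (l : List Char) : ∀ (j : Nat) (d : Int), j < l.length →
    (pyB_buildD l d).getD j 0 = (l.take (j + 1)).foldl pvStep d := by
  induction l with
  | nil => intro j d h; simp at h
  | cons ch t ih =>
    intro j d h
    cases j with
    | zero => simp [pyB_buildD, pvStep]
    | succ j =>
      have := ih j (if ch = '(' then d + 1 else if ch = ')' then d - 1 else d) (by simpa using h)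
      simp only [pyB_buildD, List.getD_cons_succ, List.take_succ_cons, List.foldl_cons]
      rw [this]
      rfl

lemma pvRef_skip (full tok : List Char) (start m : Nat) (hsm : start ≤ m) (hmn : m ≤ full.length)
    (h : ∀ j, start ≤ j → j < m → pvGood full tok j = false) :
    pvRef full tok start = pvRef full tok m := by
  unfold pvRef
  have hsplit : List.range' start (m - start) ++ List.range' m (full.length - m)
      = List.range' start (full.length - start) := by
    have h1 := @List.range'_append_1 start (m - start) (full.length - m)
    rw [show start + (m - start) = m by omega] at h1
    rw [show (m - start) + (full.length - m) = full.length - start by omega] at h1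
    exact h1
  rw [← hsplit, List.find?_append]
  have hnone : (List.range' start (m - start)).find? (pvGood full tok) = none := by
    rw [List.find?_eq_none]
    intro j hj
    have hmem := List.mem_range'_1.mp hj
    simp [h j hmem.1 (by omega)]
  rw [hnone, Option.none_or]

lemma prefix_drop_infix_drop (full tok : List Char) (start j : Nat) (hsj : start ≤ j)
    (h : tok <+: full.drop j) : tok <:+: full.drop start := by
  have hd : full.drop j = (full.drop start).drop (j - start) := by
    rw [List.drop_drop]; congr 1; omega
  rw [hd] at h
  exact h.isInfix.trans (List.drop_suffix _ _).isInfix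

lemma pvRef_none_of_all_bad (full tok : List Char) (start : Nat)
    (h : ∀ j, start ≤ j → j < full.length → ¬ tok <+: full.drop j) :
    pvRef full tok start = -1 := by
  unfold pvRef
  rw [show (List.range' start (full.length - start)).find? (pvGood full tok) = none by
    rw [List.find?_eq_none]
    intro j hj
    have hmem := List.mem_range'_1.mp hj
    unfold pvGood
    simp
    intro _
    exact h j hmem.1 (by omega)]

lemma B_correct (full tok : List Char) :
    ∀ fuel start, start ≤ full.length → full.length - start < fuel →
    pyB_loop full tok (pyB_buildD full 0) full.length fuel start = pvRef full tok start := by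
  intro fuel
  induction fuel with
  | zero => intro start h1 h2; omega
  | succ fuel ih =>
    intro start h1 h2
    simp only [pyB_loop]
    by_cases hneg : PySem.Chars.findFrom full tok (start : Int) none = -1
    · rw [if_pos (Or.inl hneg)]
      have hno : ¬ tok <:+: full.drop start :=
        (PySem.Chars.findFrom_natCast_eq_neg_one_iff full tok start h1).mp hneg
      rw [pvRef_none_of_all_bad full tok start (fun j hsj _ hp => hno (prefix_drop_infix_drop full tok start j hsj hp))]
    · obtain ⟨hle, hpre, hmin⟩ := PySem.Chars.findFrom_natCast_spec full tok start h1 hneg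
      set p := PySem.Chars.findFrom full tok (start : Int) none with hp
      have hp0 : (0 : Int) ≤ p := le_trans (by exact_mod_cast Nat.zero_le start) hle
      have hpq : p = ((p.toNat : Nat) : Int) := (Int.toNat_of_nonneg hp0).symm
      have hsq : start ≤ p.toNat := by omega
      by_cases hge : (full.length : Int) ≤ p
      · rw [if_pos (Or.inr hge)]
        rw [pvRef_none_of_all_bad full tok start (fun j hsj hjn => hmin j hsj (by omega))]
      · rw [if_neg (by push Not; exact ⟨hneg, lt_of_not_ge (fun hc => hge (by omega))⟩)]
        have hqn : p.toNat < full.length := by omega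
        have hD : PySem.List.pyGetD (pyB_buildD full 0) p 0 = pvBal (full.take (p.toNat + 1)) := by
          have h' : PySem.List.pyGetD (pyB_buildD full 0) ((p.toNat : Nat) : Int) 0
              = pvBal (full.take (p.toNat + 1)) := by
            rw [PySem.List.pyGetD_natCast, buildD_getD full p.toNat 0 hqn]
            rfl
          rw [hpq]
          exact h'
        by_cases hz : pvBal (full.take (p.toNat + 1)) = 0
        · rw [if_pos (by rw [hD]; exact hz)]
          rw [pvRef_skip full tok start p.toNat hsq (le_of_lt hqn)
            (fun j hsj hjq => by
              unfold pvGood; simp; intro _; exact hmin j hsj hjq)]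
          unfold pvRef
          rw [show full.length - p.toNat = (full.length - (p.toNat + 1)) + 1 by omega,
            List.range'_succ, List.find?_cons_of_pos (by unfold pvGood; simp; exact ⟨hz, hpre⟩)]
          exact hpq
        · rw [if_neg (by rw [hD]; exact hz)]
          rw [ih (p.toNat + 1) (by omega) (by omega)]
          rw [pvRef_skip full tok start (p.toNat + 1) (by omega) (by omega)
            (fun j hsj hjq => by
              unfold pvGood
              simp
              intro hb
              rcases Nat.lt_or_ge j p.toNat with hlt | hge2
              · exact hmin j hsj hlt
              · have hj : j = p.toNat := by omega
                subst hj
                exact absurd hb hz)]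

-- ===== VERDICT (by name: the statement is the Claim_ definition above) =====
theorem find_top_level_py_spec : Claim_equal_find_top_level_py := by
  intro expr token _
  unfold Spec_find_top_level_py find_top_level_py find_top_level_py_alt
  rw [B_correct expr.toList token.toList (expr.toList.length + 1) 0 (Nat.zero_le _) (by omega)]
  have := A_correct expr.toList token.toList expr.toList 0 rfl
  simpa [pvBal] using this
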